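-- pv_equiv track=rewrite | github.com/OhadMyrtenbaum/MAGDAD | testing.py | add_card_to_state
-- ===== SOURCE A (Python) =====
-- values = {'2': 2, '3': 3, '4': 4, '5': 5, '6': 6, '7': 7, '8': 8,
--           '9': 9, '10': 10, 'J': 10, 'Q': 10, 'K': 10, 'A': 11}
--
-- def add_card_to_state(total, usable_aces, rank):
--     """Update (total, usable_aces) when drawing a rank."""
--     if rank == 'A':
--         total += 11
--         usable_aces += 1
--     else:
--         total += values[rank]
--
--     while total > 21 and usable_aces > 0:
--         total -= 10
--         usable_aces -= 1
--
--     return total, usable_aces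
-- ===== SOURCE B (Python) =====
-- values = {'2': 2, '3': 3, '4': 4, '5': 5, '6': 6, '7': 7, '8': 8,
--           '9': 9, '10': 10, 'J': 10, 'Q': 10, 'K': 10, 'A': 11}
--
-- def add_card_to_state(total, usable_aces, rank):
--     """Update (total, usable_aces) when drawing a rank (closed form, no loop)."""
--     if rank == 'A':
--         total += 11
--         usable_aces += 1
--     else:
--         total += values[rank]
--     # number of aces the loop would demote, in one arithmetic step
--     k = max(0, min(usable_aces, -((21 - total) // 10)))
--     return total - 10 * k, usable_aces - k
-- ===== Notes on version B (the rewrite author's own statement) =====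
-- stated objective: alternative
-- what changed: The while loop that demotes usable aces one at a time is replaced by a closed-form computation of how many aces must be demoted (k = max(0, min(usable_aces, ceil((total-21)/10)))), applied in one step.
import Mathlib
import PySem

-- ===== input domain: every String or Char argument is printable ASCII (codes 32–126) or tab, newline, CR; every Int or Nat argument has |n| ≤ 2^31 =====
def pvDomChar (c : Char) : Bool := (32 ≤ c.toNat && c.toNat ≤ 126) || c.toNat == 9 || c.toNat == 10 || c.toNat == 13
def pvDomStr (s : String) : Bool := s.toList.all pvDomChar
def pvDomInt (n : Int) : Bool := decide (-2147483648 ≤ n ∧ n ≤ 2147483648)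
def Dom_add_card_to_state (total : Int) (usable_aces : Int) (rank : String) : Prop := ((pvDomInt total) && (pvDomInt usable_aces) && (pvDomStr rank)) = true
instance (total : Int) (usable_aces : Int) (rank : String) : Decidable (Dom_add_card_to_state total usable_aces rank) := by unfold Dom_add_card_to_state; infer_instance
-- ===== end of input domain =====

-- B replaces A's one-ace-at-a-time demotion loop by a closed-form count of the aces to demote (alternative decomposition, same exact values).

-- ===== PORT A =====
def pvValues : PySem.Dict String Int := PySem.Dict.ofList
  [("2", 2), ("3", 3), ("4", 4), ("5", 5), ("6", 6), ("7", 7), ("8", 8),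
   ("9", 9), ("10", 10), ("J", 10), ("Q", 10), ("K", 10), ("A", 11)]

-- the while loop of A: while total > 21 and usable_aces > 0: total -= 10; usable_aces -= 1
def pvAceLoop (total : Int) (usable_aces : Int) : Int × Int :=
  if h : total > 21 ∧ usable_aces > 0 then pvAceLoop (total - 10) (usable_aces - 1)
  else (total, usable_aces)
termination_by usable_aces.toNat
decreasing_by omega

def add_card_to_state (total : Int) (usable_aces : Int) (rank : String) : Int × Int :=
  let st : Int × Int :=
    if rank = "A" then (total + 11, usable_aces + 1)
    else (total + (PySem.Dict.get? pvValues rank).getD 0, usable_aces)  -- values[rank]; KeyError excluded by Pre_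
  pvAceLoop st.1 st.2

-- ===== PORT B =====
def add_card_to_state_alt (total : Int) (usable_aces : Int) (rank : String) : Int × Int :=
  let st : Int × Int :=
    if rank = "A" then (total + 11, usable_aces + 1)
    else (total + (PySem.Dict.get? pvValues rank).getD 0, usable_aces)  -- values[rank]; KeyError excluded by Pre_
  let k : Int := max 0 (min st.2 (-(PySem.Int.floordiv (21 - st.1) 10)))
  (st.1 - 10 * k, st.2 - k)

-- ===== PRECONDITION & SPEC =====
-- Pre_ excludes exactly the ranks not in the values dict, on which Python A raises KeyError.
def Pre_add_card_to_state (total : Int) (usable_aces : Int) (rank : String) : Prop :=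
  rank ∈ ["2", "3", "4", "5", "6", "7", "8", "9", "10", "J", "Q", "K", "A"]
instance (total : Int) (usable_aces : Int) (rank : String) : Decidable (Pre_add_card_to_state total usable_aces rank) := by unfold Pre_add_card_to_state; infer_instance

def pvWitness_add_card_to_state : Int × Int × String := (18, 1, "K")

def Spec_add_card_to_state (total : Int) (usable_aces : Int) (rank : String) (out : Int × Int) : Prop := out = add_card_to_state_alt total usable_aces rank
instance (total : Int) (usable_aces : Int) (rank : String) (out : Int × Int) : Decidable (Spec_add_card_to_state total usable_aces rank out) := by unfold Spec_add_card_to_state; infer_instance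

-- ===== CLAIM (what is proved, stated in full; the proofs are below) =====
def Claim_equal_add_card_to_state : Prop := ∀ (total : Int) (usable_aces : Int) (rank : String), Dom_add_card_to_state total usable_aces rank → Pre_add_card_to_state total usable_aces rank → Spec_add_card_to_state total usable_aces rank (add_card_to_state total usable_aces rank)

-- ===== LEMMAS AND PROOFS =====

-- the loop demotes exactly max 0 (min a (ceil((t-21)/10))) aces
theorem pvAceLoop_closed (n : Nat) : ∀ (t a : Int), a.toNat = n →
    pvAceLoop t a = (t - 10 * max 0 (min a (-((21 - t) / 10))), a - max 0 (min a (-((21 - t) / 10)))) := by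
  induction n with
  | zero =>
    intro t a ha
    have ha' : a ≤ 0 := by omega
    rw [pvAceLoop]
    have : ¬ (t > 21 ∧ a > 0) := by omega
    simp only [this, dite_false]
    have : max 0 (min a (-((21 - t) / 10))) = 0 := by omega
    rw [this]; simp
  | succ m ih =>
    intro t a ha
    rw [pvAceLoop]
    by_cases h : t > 21 ∧ a > 0
    · rw [dif_pos h, ih (t - 10) (a - 1) (by omega)]
      have hd : (21 - (t - 10)) / 10 = (21 - t) / 10 + 1 := by omega
      rw [hd]
      have hq : (21 - t) / 10 ≤ -1 := by omega
      simp only [Prod.mk.injEq]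
      constructor <;> omega
    · rw [dif_neg h]
      have hle : t ≤ 21 ∨ a ≤ 0 := by omega
      have : max 0 (min a (-((21 - t) / 10))) = 0 := by
        rcases hle with h1 | h1
        · have : 0 ≤ (21 - t) / 10 := by omega
          omega
        · omega
      rw [this]; simp

-- ===== VERDICT (by name: the statement is the Claim_ definition above) =====
theorem add_card_to_state_spec : Claim_equal_add_card_to_state := by
  intro total usable_aces rank _ _
  unfold Spec_add_card_to_state add_card_to_state add_card_to_state_alt
  have hfd : ∀ x : Int, PySem.Int.floordiv x 10 = x / 10 := fun x =>
    PySem.Int.floordiv_eq_ediv_of_pos (by norm_num)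
  by_cases h : rank = "A" <;>
    simp only [h, if_true, if_false, hfd] <;>
    exact pvAceLoop_closed _ _ _ rfl
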